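-- pv_equiv track=rewrite | github.com/gracerosechm25/wordle-AI | gameplay.py | check_yellow
-- ===== SOURCE A (Python) =====
-- def check_yellow(word, yellow, green_loc): # just needs to be in a spot other than where it is green
--     possible = {}
--     for letter in yellow:
--         possible[letter] = 1
--     for i, letter in enumerate(word):
--         if letter in possible:
--             if letter in green_loc:
--                     if i != green_loc[letter]:
--                         possible[letter] = 0
--             else: # exists in a spot that is not the green
--                 possible[letter] = 0
--
--     return sum(possible.values()) # return if all the yellow letters appear in the word somewhere other than the green spots, 0 means they do
-- ===== SOURCE B (Python) =====
-- def check_yellow(word, yellow, green_loc):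
--     def placed_outside(letter):
--         # letter occurs at some position that is not its green spot
--         return any(ch == letter and (letter not in green_loc or i != green_loc[letter])
--                    for i, ch in enumerate(word))
--     return sum(0 if placed_outside(letter) else 1 for letter in set(yellow))
-- ===== Notes on version B (the rewrite author's own statement) =====
-- stated objective: alternative
-- what changed: Inverts the loop structure: instead of A's single pass over the word mutating a per-yellow-letter flag dict, B scans the word once per distinct yellow letter (any() over enumerate) to test whether that letter occurs outside its green spot, and sums the verdicts.
import Mathlib
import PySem

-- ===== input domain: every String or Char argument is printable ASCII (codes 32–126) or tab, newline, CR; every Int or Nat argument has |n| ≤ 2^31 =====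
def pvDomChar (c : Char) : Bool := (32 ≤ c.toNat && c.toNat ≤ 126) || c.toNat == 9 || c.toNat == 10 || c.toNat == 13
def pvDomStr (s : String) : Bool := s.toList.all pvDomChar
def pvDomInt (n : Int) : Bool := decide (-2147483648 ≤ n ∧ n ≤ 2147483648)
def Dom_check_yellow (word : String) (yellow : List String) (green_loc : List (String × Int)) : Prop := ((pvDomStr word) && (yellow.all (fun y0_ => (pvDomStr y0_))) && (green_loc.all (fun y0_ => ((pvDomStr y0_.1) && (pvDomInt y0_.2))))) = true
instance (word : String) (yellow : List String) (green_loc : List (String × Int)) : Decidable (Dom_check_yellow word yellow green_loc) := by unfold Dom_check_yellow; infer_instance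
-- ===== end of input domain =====

-- B inverts the loops: instead of A's single word pass mutating a per-yellow-letter flag dict,
-- B scans the word once per distinct yellow letter and sums the verdicts (alternative).

-- ===== PORT A =====
-- one step of A's 'for i, letter in enumerate(word)' loop over the flag dict
def cyStep (green_loc : List (String × Int)) (d : PySem.Dict String Int) (p : Int × Char) : PySem.Dict String Int :=
  let letter := String.mk [p.2]
  if d.contains letter then
    if (PySem.Dict.mk green_loc).contains letter then
      if p.1 ≠ (PySem.Dict.mk green_loc).getD letter 0 then d.insert letter 0 else d
    else d.insert letter 0
  else d

def check_yellow (word : String) (yellow : List String) (green_loc : List (String × Int)) : Int :=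
  let possible0 := yellow.foldl (fun d l => d.insert l (1 : Int)) PySem.Dict.empty
  let possible := (PySem.List.enumerate word.toList).foldl (cyStep green_loc) possible0
  possible.values.sum

-- ===== PORT B =====
-- the condition tested for one position p of the word inside B's any()
def cyOutside (green_loc : List (String × Int)) (letter : String) (p : Int × Char) : Bool :=
  (String.mk [p.2] == letter) &&
    (!(PySem.Dict.mk green_loc).contains letter ||
      decide (p.1 ≠ (PySem.Dict.mk green_loc).getD letter 0))

-- B's helper 'placed_outside(letter)': any position of the word holds letter outside its green spot
def cyPlacedOutside (word : String) (green_loc : List (String × Int)) (letter : String) : Bool :=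
  (PySem.List.enumerate word.toList).any (cyOutside green_loc letter)

def check_yellow_alt (word : String) (yellow : List String) (green_loc : List (String × Int)) : Int :=
  ((PySem.Set.ofList yellow).map
    (fun letter => if cyPlacedOutside word green_loc letter then (0 : Int) else 1)).sum

-- ===== PRECONDITION & SPEC =====
def Spec_check_yellow (word : String) (yellow : List String) (green_loc : List (String × Int)) (out : Int) : Prop := out = check_yellow_alt word yellow green_loc
instance (word : String) (yellow : List String) (green_loc : List (String × Int)) (out : Int) : Decidable (Spec_check_yellow word yellow green_loc out) := by unfold Spec_check_yellow; infer_instance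

-- ===== CLAIM (what is proved, stated in full; the proofs are below) =====
def Claim_equal_check_yellow : Prop := ∀ (word : String) (yellow : List String) (green_loc : List (String × Int)), Dom_check_yellow word yellow green_loc → Spec_check_yellow word yellow green_loc (check_yellow word yellow green_loc)

-- ===== LEMMAS AND PROOFS =====

-- the init loop stores 1 at every key, so getD · 1 is constantly 1
theorem cy_getD_init (yellow : List String) (d : PySem.Dict String Int) (k : String)
    (h : d.getD k 1 = 1) :
    (yellow.foldl (fun d l => d.insert l (1 : Int)) d).getD k 1 = 1 := by
  induction yellow generalizing d with
  | nil => exact h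
  | cons a t ih =>
      refine ih _ ?_
      rw [PySem.Dict.getD_insert]
      split <;> simp [h]

theorem cyStep_keys (g : List (String × Int)) (d : PySem.Dict String Int) (p : Int × Char) :
    (cyStep g d p).keys = d.keys := by
  unfold cyStep
  dsimp only
  split_ifs with h1 h2 h3 <;>
    simp_all [PySem.Dict.keys_insert_of_contains]

theorem cy_loop_keys (g : List (String × Int)) (l : List (Int × Char)) (d : PySem.Dict String Int) :
    (l.foldl (cyStep g) d).keys = d.keys := by
  induction l generalizing d with
  | nil => rfl
  | cons p t ih => rw [List.foldl_cons, ih, cyStep_keys]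

theorem cyStep_contains (g : List (String × Int)) (d : PySem.Dict String Int) (p : Int × Char) (k : String) :
    (cyStep g d p).contains k = d.contains k := by
  rw [PySem.Dict.contains_eq_decide_mem_keys, PySem.Dict.contains_eq_decide_mem_keys, cyStep_keys]

-- main loop invariant: the flag at k ends 0 iff k was a key and some position of the
-- remaining word puts k outside its green spot
theorem cy_loop_getD (g : List (String × Int)) (l : List (Int × Char)) (d : PySem.Dict String Int) (k : String) :
    (l.foldl (cyStep g) d).getD k 1 =
      if d.contains k && l.any (cyOutside g k) then 0 else d.getD k 1 := by
  induction l generalizing d with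
  | nil => simp
  | cons p t ih =>
      rw [List.foldl_cons, ih, cyStep_contains, List.any_cons]
      by_cases hk : k = String.mk [p.2]
      · subst hk
        have hout : cyOutside g (String.mk [p.2]) p =
            (!(PySem.Dict.mk g).contains (String.mk [p.2]) ||
              decide (p.1 ≠ (PySem.Dict.mk g).getD (String.mk [p.2]) 0)) := by
          simp [cyOutside]
        by_cases hc : d.contains (String.mk [p.2])
        · by_cases hg : (PySem.Dict.mk g).contains (String.mk [p.2])
          · by_cases hne : p.1 ≠ (PySem.Dict.mk g).getD (String.mk [p.2]) 0
            · have hstep : cyStep g d p = d.insert (String.mk [p.2]) 0 := by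
                unfold cyStep; dsimp only; rw [if_pos hc, if_pos hg, if_pos hne]
              rw [hstep, hout]
              simp [hc, hg, hne]
            · have hstep : cyStep g d p = d := by
                unfold cyStep; dsimp only; rw [if_pos hc, if_pos hg, if_neg hne]
              have hne' : p.1 = (PySem.Dict.mk g).getD (String.mk [p.2]) 0 := not_not.mp hne
              rw [hstep, hout, hg, hne']
              rw [decide_eq_false (show ¬((PySem.Dict.mk g).getD (String.mk [p.2]) 0 ≠ (PySem.Dict.mk g).getD (String.mk [p.2]) 0) by simp),
                Bool.not_true, Bool.false_or, Bool.false_or]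
          · have hstep : cyStep g d p = d.insert (String.mk [p.2]) 0 := by
              unfold cyStep; dsimp only; rw [if_pos hc, if_neg hg]
            rw [hstep, hout]
            simp [hc, hg]
        · have hstep : cyStep g d p = d := by
            unfold cyStep; dsimp only; rw [if_neg hc]
          rw [hstep]
          simp [hc]
      · have hbeq : (String.mk [p.2] == k) = false := by
          exact beq_eq_false_iff_ne.mpr (Ne.symm hk)
        have hout : cyOutside g k p = false := by
          simp [cyOutside, hbeq]
        have hstep1 : (cyStep g d p).getD k 1 = d.getD k 1 := by
          unfold cyStep; dsimp only
          split_ifs <;> simp_all [PySem.Dict.getD_insert]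
        rw [hstep1, hout, Bool.false_or]

theorem cy_init_keys (yellow : List String) :
    (yellow.foldl (fun d l => d.insert l (1 : Int)) PySem.Dict.empty).keys = PySem.Set.ofList yellow := by
  rw [PySem.Dict.keys_foldl_insert]
  simpa using PySem.Set.update_nil_left yellow

-- ===== VERDICT (by name: the statement is the Claim_ definition above) =====
theorem check_yellow_spec : Claim_equal_check_yellow := by
  intro word yellow green_loc _
  unfold Spec_check_yellow check_yellow check_yellow_alt
  dsimp only
  set d0 := yellow.foldl (fun d l => d.insert l (1 : Int)) PySem.Dict.empty with hd0
  have hnd0 : d0.keys.Nodup := PySem.Dict.nodup_keys_foldl_insert _ _ _ PySem.Dict.nodup_keys_empty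
  set dF := (PySem.List.enumerate word.toList).foldl (cyStep green_loc) d0 with hdF
  have hkeys : dF.keys = PySem.Set.ofList yellow := by
    rw [hdF, cy_loop_keys, cy_init_keys]
  have hndF : dF.keys.Nodup := by rw [cy_loop_keys]; exact hnd0
  rw [PySem.Dict.values_eq_map_keys dF hndF 1, hkeys]
  congr 1
  apply List.map_congr_left
  intro k hk
  have hc : d0.contains k = true := by
    rw [PySem.Dict.contains_iff_mem_keys, cy_init_keys]; exact hk
  rw [hdF, cy_loop_getD, hc, cy_getD_init yellow PySem.Dict.empty k (by simp), Bool.true_and]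
  unfold cyPlacedOutside
  by_cases h : (PySem.List.enumerate word.toList).any (cyOutside green_loc k) = true <;> simp [h]
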